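-- pv_equiv track=rewrite | github.com/abhishekg999/BrainRot | src/worlds.py | points_in_circle
-- ===== SOURCE A (Python) =====
-- def points_in_circle(arr, x, y, radius):
--     result = []
--     rows, cols = len(arr), len(arr[0])
--
--     # Define the bounding box for the circle
--     min_row = max(0, int(x - radius))
--     max_row = min(rows, int(x + radius) + 1)
--     min_col = max(0, int(y - radius))
--     max_col = min(cols, int(y + radius) + 1)
--
--     # Check each point in the bounding box
--     for row in range(min_row, max_row):
--         for col in range(min_col, max_col):
--             # Check if the point is within the circle
--             if (row - x)**2 + (col - y)**2 <= radius**2: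
--                 result.append(arr[row][col])
--
--     return result
-- ===== SOURCE B (Python) =====
-- def _isqrt(n):
--     # integer square root by binary search: returns s with s*s <= n < (s+1)*(s+1)
--     lo, hi = 0, n + 1
--     while hi - lo > 1:
--         m = (lo + hi) // 2
--         if m * m <= n:
--             lo = m
--         else:
--             hi = m
--     return lo
--
--
-- def points_in_circle(arr, x, y, radius):
--     rows, cols = len(arr), len(arr[0])
--     min_row = max(0, x - radius)
--     max_row = min(rows, x + radius + 1)
--     min_col = max(0, y - radius)
--     max_col = min(cols, y + radius + 1)
--     result = []
--     for row in range(min_row, max_row):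
--         rem = radius * radius - (row - x) * (row - x)
--         if rem < 0:
--             continue
--         s = _isqrt(rem)
--         lo = max(min_col, y - s)
--         hi = min(max_col, y + s + 1)
--         if lo < hi:
--             result.extend(arr[row][lo:hi])
--     return result
-- ===== Notes on version B (the rewrite author's own statement) =====
-- stated objective: alternative
-- what changed: Instead of testing every (row,col) cell of the bounding box, B computes for each row the exact integer interval of in-circle columns via an integer binary-search square root and appends that horizontal slice of the row (per-row slice instead of per-cell membership test).
-- outside the precondition, e.g. on points_in_circle([[1, 2], [3]], 0, 1, 1): A raises IndexError, B returns [1, 2]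
import Mathlib
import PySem

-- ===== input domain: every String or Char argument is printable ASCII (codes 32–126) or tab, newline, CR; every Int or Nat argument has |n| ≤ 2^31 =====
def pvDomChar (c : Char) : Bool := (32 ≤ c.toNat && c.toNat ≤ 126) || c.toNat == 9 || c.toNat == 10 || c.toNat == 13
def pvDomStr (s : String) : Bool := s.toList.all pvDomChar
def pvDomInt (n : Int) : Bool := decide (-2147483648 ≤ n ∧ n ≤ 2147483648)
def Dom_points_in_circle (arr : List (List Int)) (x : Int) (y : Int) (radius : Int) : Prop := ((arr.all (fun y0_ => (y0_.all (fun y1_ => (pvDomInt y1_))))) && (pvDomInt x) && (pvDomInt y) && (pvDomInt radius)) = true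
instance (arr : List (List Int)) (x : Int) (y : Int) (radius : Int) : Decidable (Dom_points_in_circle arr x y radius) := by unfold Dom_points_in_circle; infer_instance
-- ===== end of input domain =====

-- B replaces A's per-cell membership test over the whole bounding box by a per-row slice:
-- for each row it computes the exact integer interval of in-circle columns (via an integer
-- binary-search square root) and extends the result with that slice of the row.

-- ===== PORT A =====
def points_in_circle (arr : List (List Int)) (x : Int) (y : Int) (radius : Int) : List Int :=
  let rows : Int := arr.length
  let cols : Int := (PySem.List.pyGetD arr 0 []).length
  let min_row := max 0 (x - radius)
  let max_row := min rows (x + radius + 1)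
  let min_col := max 0 (y - radius)
  let max_col := min cols (y + radius + 1)
  (PySem.List.pyRange min_row max_row 1).foldl (fun result row =>
    (PySem.List.pyRange min_col max_col 1).foldl (fun result col =>
      if (row - x)^2 + (col - y)^2 ≤ radius^2 then
        result ++ [PySem.List.pyGetD (PySem.List.pyGetD arr row []) col 0]
      else result) result) []

-- ===== PORT B =====
-- _isqrt from Source B: binary search for the integer square root (the while loop as
-- fuel-bounded recursion; the interval shrinks each pass, so (hi-lo) passes always suffice)
def pySqrtGo (n : Int) : Nat -> Int -> Int -> Int
  | 0, lo, _ => lo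
  | fuel + 1, lo, hi =>
    if 1 < hi - lo then
      let m := PySem.Int.floordiv (lo + hi) 2
      if m * m <= n then pySqrtGo n fuel m hi else pySqrtGo n fuel lo m
    else lo

def pyIsqrt (n : Int) : Int := pySqrtGo n (n + 1).toNat 0 (n + 1)

def points_in_circle_alt (arr : List (List Int)) (x : Int) (y : Int) (radius : Int) : List Int :=
  let rows : Int := arr.length
  let cols : Int := (PySem.List.pyGetD arr 0 []).length
  let min_row := max 0 (x - radius)
  let max_row := min rows (x + radius + 1)
  let min_col := max 0 (y - radius)
  let max_col := min cols (y + radius + 1)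
  (PySem.List.pyRange min_row max_row 1).foldl (fun result row =>
    let rem := radius * radius - (row - x) * (row - x)
    if rem < 0 then result
    else
      let s := pyIsqrt rem
      let lo := max min_col (y - s)
      let hi := min max_col (y + s + 1)
      if lo < hi then result ++ PySem.List.slice (PySem.List.pyGetD arr row []) (some lo) (some hi)
      else result) []

-- ===== PRECONDITION & SPEC =====
-- Pre_ excludes exactly the inputs where the Python A raises: the empty grid (len(arr[0]) is
-- an IndexError) and grids whose circle/bounding-box intersection reaches a column index
-- beyond the length of some (ragged) row, where arr[row][col] is an IndexError.
def Pre_points_in_circle (arr : List (List Int)) (x : Int) (y : Int) (radius : Int) : Prop :=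
  arr ≠ [] ∧
  ∀ row ∈ PySem.List.pyRange (max 0 (x - radius)) (min (arr.length : Int) (x + radius + 1)) 1,
    ∀ col ∈ PySem.List.pyRange (max 0 (y - radius))
        (min ((PySem.List.pyGetD arr 0 []).length : Int) (y + radius + 1)) 1,
      (row - x)^2 + (col - y)^2 ≤ radius^2 →
        col < ((PySem.List.pyGetD arr row []).length : Int)
instance (arr : List (List Int)) (x : Int) (y : Int) (radius : Int) : Decidable (Pre_points_in_circle arr x y radius) := by unfold Pre_points_in_circle; infer_instance

def pvWitness_points_in_circle : List (List Int) × Int × Int × Int := ([[1, 2], [3, 4]], 0, 0, 1)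

def Spec_points_in_circle (arr : List (List Int)) (x : Int) (y : Int) (radius : Int) (out : List Int) : Prop := out = points_in_circle_alt arr x y radius
instance (arr : List (List Int)) (x : Int) (y : Int) (radius : Int) (out : List Int) : Decidable (Spec_points_in_circle arr x y radius out) := by unfold Spec_points_in_circle; infer_instance

-- ===== CLAIM (what is proved, stated in full; the proofs are below) =====
def Claim_equal_points_in_circle : Prop := ∀ (arr : List (List Int)) (x : Int) (y : Int) (radius : Int), Dom_points_in_circle arr x y radius → Pre_points_in_circle arr x y radius → Spec_points_in_circle arr x y radius (points_in_circle arr x y radius)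

-- ===== LEMMAS AND PROOFS =====

-- the binary search maintains lo*lo <= n < hi*hi; at exit hi = lo+1, so the result is the isqrt
theorem pySqrtGo_spec (n : Int) : ∀ (fuel : Nat) (lo hi : Int), (hi - lo).toNat ≤ fuel + 1 →
    lo * lo ≤ n → n < hi * hi → lo < hi →
    lo ≤ pySqrtGo n fuel lo hi ∧ pySqrtGo n fuel lo hi * pySqrtGo n fuel lo hi ≤ n ∧
      n < (pySqrtGo n fuel lo hi + 1) * (pySqrtGo n fuel lo hi + 1) := by
  intro fuel
  induction fuel with
  | zero =>
    intro lo hi hk h1 h2 h3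
    have : hi = lo + 1 := by omega
    subst this
    simp only [pySqrtGo]
    exact ⟨le_refl _, h1, by nlinarith⟩
  | succ f ih =>
    intro lo hi hk h1 h2 h3
    rw [pySqrtGo]
    by_cases h : 1 < hi - lo
    · simp only [h, if_pos]
      have hb := (PySem.Int.floordiv_eq_iff_of_pos (a := lo + hi) (b := 2)
        (q := PySem.Int.floordiv (lo + hi) 2) (by omega)).mp rfl
      set m := PySem.Int.floordiv (lo + hi) 2 with hm
      by_cases hc : m * m ≤ n
      · simp only [hc, if_pos]
        exact ⟨by have := (ih m hi (by omega) hc h2 (by omega)).1; omega,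
          (ih m hi (by omega) hc h2 (by omega)).2⟩
      · simp only [hc, if_neg, not_false_iff]
        exact ⟨(ih lo m (by omega) h1 (by omega) (by omega)).1,
          (ih lo m (by omega) h1 (by omega) (by omega)).2⟩
    · simp only [h, if_neg, not_false_iff]
      have : hi = lo + 1 := by omega
      subst this
      exact ⟨le_refl _, h1, by nlinarith⟩

theorem pyIsqrt_spec (n : Int) (h : 0 ≤ n) :
    0 ≤ pyIsqrt n ∧ pyIsqrt n * pyIsqrt n ≤ n ∧ n < (pyIsqrt n + 1) * (pyIsqrt n + 1) := by
  have := pySqrtGo_spec n (n + 1).toNat 0 (n + 1) (by omega) (by omega) (by nlinarith) (by omega)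
  exact ⟨this.1, this.2⟩

-- filtering a range by an interval predicate yields the clamped interval
theorem filter_pyRange_interval (a b l h : Int) (p : Int → Bool)
    (hp : ∀ j, p j = true ↔ l ≤ j ∧ j < h) :
    (PySem.List.pyRange a b 1).filter p = PySem.List.pyRange (max a l) (min b h) 1 := by
  refine List.Perm.eq_of_pairwise (le := (· < ·))
    (fun a b _ _ h1 h2 => absurd h2 (not_lt.mpr h1.le)) ?_ ?_ ?_
  · exact List.Pairwise.sublist (List.filter_sublist) (PySem.List.pairwise_lt_pyRange_one a b)
  · exact PySem.List.pairwise_lt_pyRange_one _ _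
  · rw [List.perm_ext_iff_of_nodup (List.Nodup.filter _ (PySem.List.nodup_pyRange_one a b))
      (PySem.List.nodup_pyRange_one _ _)]
    intro j
    simp only [List.mem_filter, PySem.List.mem_pyRange_one, hp]
    omega

-- reading a range of indices out of a list is a slice
theorem map_pyGetD_eq_slice (xs : List Int) (lo hi : Int) (h0 : 0 ≤ lo) (h1 : lo ≤ hi)
    (h2 : hi ≤ (xs.length : Int)) :
    (PySem.List.pyRange lo hi 1).map (fun j => PySem.List.pyGetD xs j 0) =
      PySem.List.slice xs (some lo) (some hi) := by
  have hsplit := PySem.List.pyRange_one_append lo hi (xs.length : Int) h1 h2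
  have hdrop := PySem.List.map_pyGetD_pyRange' (xs := xs) (a := lo) (d := 0) h0
  rw [PySem.List.slice_toNat _ h0 (by omega)]
  rw [hsplit, List.map_append] at hdrop
  have hlen : ((PySem.List.pyRange lo hi 1).map (fun j => PySem.List.pyGetD xs j 0)).length
      = hi.toNat - lo.toNat := by
    rw [List.length_map, PySem.List.length_pyRange_one]; omega
  rw [← hdrop, List.take_left' hlen]

-- per-row equality: A's filtered scan of the column range equals B's slice contribution
theorem row_eq (rowl : List Int) (y minc maxc rem : Int)
    (hminc : 0 ≤ minc)
    (hrem : ∀ col, minc ≤ col → col < maxc → (col - y)^2 ≤ rem → col < (rowl.length : Int)) :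
    ((PySem.List.pyRange minc maxc 1).filter (fun col => decide ((col - y)^2 ≤ rem))).map
        (fun col => PySem.List.pyGetD rowl col 0) =
      if rem < 0 then []
      else if max minc (y - pyIsqrt rem) < min maxc (y + pyIsqrt rem + 1) then
        PySem.List.slice rowl (some (max minc (y - pyIsqrt rem)))
          (some (min maxc (y + pyIsqrt rem + 1)))
      else [] := by
  by_cases hneg : rem < 0
  · simp only [hneg, if_pos]
    have : (PySem.List.pyRange minc maxc 1).filter (fun col => decide ((col - y)^2 ≤ rem)) = [] := by
      apply List.filter_eq_nil_iff.mpr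
      intro j _
      simp only [decide_eq_true_eq]
      nlinarith [sq_nonneg (j - y)]
    rw [this]; rfl
  · push_neg at hneg
    obtain ⟨hs0, hs1, hs2⟩ := pyIsqrt_spec rem hneg
    set s := pyIsqrt rem with hs
    have hiff : ∀ j : Int, (decide ((j - y)^2 ≤ rem)) = true ↔ (y - s) ≤ j ∧ j < y + s + 1 := by
      intro j
      simp only [decide_eq_true_eq]
      constructor
      · intro hj
        have habs : (j - y) * (j - y) ≤ rem := by nlinarith
        constructor
        · nlinarith
        · nlinarith
      · intro ⟨hj1, hj2⟩
        have : (j - y) * (j - y) ≤ s * s := by nlinarith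
        nlinarith
    rw [filter_pyRange_interval _ _ _ _ _ hiff]
    rw [if_neg (not_lt.mpr hneg)]
    by_cases hlh : max minc (y - s) < min maxc (y + s + 1)
    · rw [if_pos hlh]
      apply map_pyGetD_eq_slice
      · omega
      · omega
      · -- the last in-circle column is admitted by hrem, so the interval end is ≤ rowl.length
        have hc1 : min maxc (y + s + 1) - 1 - y ≤ s := by omega
        have hc2 : -s ≤ min maxc (y + s + 1) - 1 - y := by omega
        have hcsq : (min maxc (y + s + 1) - 1 - y) ^ 2 ≤ rem := by nlinarith
        have hcol := hrem (min maxc (y + s + 1) - 1) (by omega) (by omega) hcsq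
        omega
    · rw [if_neg hlh, PySem.List.pyRange_one_eq_nil (by omega)]
      rfl

-- ===== VERDICT (by name: the statement is the Claim_ definition above) =====
theorem points_in_circle_spec : Claim_equal_points_in_circle := by
  intro arr x y radius _hdom hpre
  obtain ⟨-, hacc⟩ := hpre
  unfold Spec_points_in_circle
  simp only [points_in_circle, points_in_circle_alt]
  apply PySem.List.foldl_congr_mem
  intro res row hrow
  rw [PySem.List.foldl_append_ite
    (p := fun col => (row - x)^2 + (col - y)^2 ≤ radius^2)
    (f := fun col => PySem.List.pyGetD (PySem.List.pyGetD arr row []) col 0)]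
  have hpred : (fun col => decide ((row - x)^2 + (col - y)^2 ≤ radius^2))
      = (fun col => decide ((col - y)^2 ≤ radius * radius - (row - x) * (row - x))) := by
    funext col
    exact decide_eq_decide.mpr ⟨fun h => by nlinarith, fun h => by nlinarith⟩
  rw [hpred]
  rw [row_eq (PySem.List.pyGetD arr row []) y (max 0 (y - radius))
      (min ((PySem.List.pyGetD arr 0 []).length : Int) (y + radius + 1))
      (radius * radius - (row - x) * (row - x)) (by omega)
      (fun col h1 h2 h3 => hacc row hrow col
        (PySem.List.mem_pyRange_one.mpr ⟨h1, h2⟩) (by nlinarith))]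
  split_ifs <;> simp
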